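-- pv_equiv track=rewrite | github.com/nm004/ngs2-tmc-blender-extension | src/ninja_gaiden_tmc/tmc11/parser.py | _gen_chunks
-- ===== SOURCE A (Python) =====
-- def _gen_chunks(data, chunk_ofs_table, chunk_size_table):
--     O = chunk_ofs_table
--     S = chunk_size_table
--     if S:
--         # Some chunks are empty
--         yield from ( data[o:(o+s)*bool(s)] for o, s in zip(O, S) )
--         return
--
--     for i, o1 in enumerate(O):
--         if not o1:
--             yield data[:0]
--             continue
--         for o2 in O[i+1:]:
--             if o2:
--                 yield data[o1:o2]
--                 break
--         else:
--             yield data[o1:]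
-- ===== SOURCE B (Python) =====
-- def _gen_chunks(data, chunk_ofs_table, chunk_size_table):
--     if chunk_size_table:
--         # Some chunks are empty
--         for o, s in zip(chunk_ofs_table, chunk_size_table):
--             yield data[o:o + s] if s else data[:0]
--         return
--
--     # Collect the nonzero offsets once; consecutive nonzero offsets bound
--     # the nonempty chunks, so slice them pairwise and interleave empties.
--     nonzero = [o for o in chunk_ofs_table if o]
--     pieces = iter(
--         data[a:] if b is None else data[a:b]
--         for a, b in zip(nonzero, nonzero[1:] + [None])
--     )
--     for o in chunk_ofs_table:
--         yield data[:0] if not o else next(pieces)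
-- ===== Notes on version B (the rewrite author's own statement) =====
-- stated objective: alternative
-- what changed: In the empty-size-table branch, B collects the nonzero offsets once, slices the nonempty chunks pairwise from consecutive nonzero offsets, and interleaves them with empty chunks in one forward pass, instead of A's rescan of the offset-table suffix at each nonzero offset; the sized branch becomes an explicit per-pair conditional instead of A's arithmetic slice bound.
import Mathlib
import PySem

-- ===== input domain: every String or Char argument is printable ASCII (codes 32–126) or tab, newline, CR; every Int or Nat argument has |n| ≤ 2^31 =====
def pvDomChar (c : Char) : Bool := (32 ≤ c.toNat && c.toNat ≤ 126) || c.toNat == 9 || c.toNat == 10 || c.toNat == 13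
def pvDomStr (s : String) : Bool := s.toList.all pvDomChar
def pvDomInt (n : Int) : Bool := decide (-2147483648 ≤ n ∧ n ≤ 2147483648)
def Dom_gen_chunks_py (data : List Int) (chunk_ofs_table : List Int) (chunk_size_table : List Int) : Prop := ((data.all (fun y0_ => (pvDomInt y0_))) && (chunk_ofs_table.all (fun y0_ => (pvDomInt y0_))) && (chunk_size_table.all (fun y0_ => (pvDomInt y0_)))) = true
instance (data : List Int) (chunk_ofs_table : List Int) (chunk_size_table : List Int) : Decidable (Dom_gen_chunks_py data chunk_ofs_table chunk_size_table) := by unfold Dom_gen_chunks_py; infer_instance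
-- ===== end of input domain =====

-- ===== PORT A =====
-- B collects nonzero offsets once and slices them pairwise, instead of A's suffix rescans.
-- inner 'for o2 in O[i+1:]: if o2: ... break / else:' loop: first nonzero element
def pvFirstNZ : List Int → Option Int
  | [] => none
  | o :: rest => if o ≠ 0 then some o else pvFirstNZ rest

def gen_chunks_py (data : List Int) (chunk_ofs_table : List Int) (chunk_size_table : List Int) : List (List Int) :=
  if chunk_size_table ≠ [] then
    (chunk_ofs_table.zip chunk_size_table).map (fun p =>
      PySem.List.slice data (some p.1) (some ((p.1 + p.2) * (if p.2 ≠ 0 then 1 else 0))))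
  else
    (PySem.List.enumerate chunk_ofs_table 0).map (fun (p : Int × Int) =>
      if p.2 = 0 then []
      else
        match pvFirstNZ (PySem.List.slice chunk_ofs_table (some (p.1 + 1)) none) with
        | some o2 => PySem.List.slice data (some p.2) (some o2)
        | none => PySem.List.slice data (some p.2) none)

-- ===== PORT B =====
-- 'data[o:o+s] if s else data[:0]' per zipped pair, by structural recursion
def pvSized (data : List Int) : List (Int × Int) → List (List Int)
  | [] => []
  | p :: rest =>
    (if p.2 ≠ 0 then PySem.List.slice data (some p.1) (some (p.1 + p.2)) else []) :: pvSized data rest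

-- 'data[a:] if b is None else data[a:b] for a, b in zip(nonzero, nonzero[1:]+[None])'
def pvPieces (data : List Int) : List Int → List (List Int)
  | [] => []
  | a :: rest =>
    (match rest with
     | [] => PySem.List.slice data (some a) none
     | b :: _ => PySem.List.slice data (some a) (some b)) :: pvPieces data rest

-- the final forward pass: empty chunk for a zero offset, else the next piece
-- (the [] default in the exhausted-pieces case is unreachable: Source B produces
-- exactly one piece per nonzero offset)
def pvInterleave : List Int → List (List Int) → List (List Int)
  | [], _ => []
  | o :: os, pieces =>
    if o = 0 then [] :: pvInterleave os pieces
    else (pieces.headD []) :: pvInterleave os pieces.tail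

def gen_chunks_py_alt (data : List Int) (chunk_ofs_table : List Int) (chunk_size_table : List Int) : List (List Int) :=
  if chunk_size_table ≠ [] then
    pvSized data (chunk_ofs_table.zip chunk_size_table)
  else
    pvInterleave chunk_ofs_table (pvPieces data (chunk_ofs_table.filter (fun o => o ≠ 0)))

-- ===== PRECONDITION & SPEC =====
def Spec_gen_chunks_py (data : List Int) (chunk_ofs_table : List Int) (chunk_size_table : List Int) (out : List (List Int)) : Prop := out = gen_chunks_py_alt data chunk_ofs_table chunk_size_table
instance (data : List Int) (chunk_ofs_table : List Int) (chunk_size_table : List Int) (out : List (List Int)) : Decidable (Spec_gen_chunks_py data chunk_ofs_table chunk_size_table out) := by unfold Spec_gen_chunks_py; infer_instance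

-- ===== CLAIM (what is proved, stated in full; the proofs are below) =====
def Claim_equal_gen_chunks_py : Prop := ∀ (data : List Int) (chunk_ofs_table : List Int) (chunk_size_table : List Int), Dom_gen_chunks_py data chunk_ofs_table chunk_size_table → Spec_gen_chunks_py data chunk_ofs_table chunk_size_table (gen_chunks_py data chunk_ofs_table chunk_size_table)

-- ===== LEMMAS AND PROOFS =====

-- the chunk A emits in the empty-size-table branch (proof-only helper)
def pvChunk (data : List Int) (o1 : Int) (nz : Option Int) : List Int :=
  if o1 = 0 then []
  else
    match nz with
    | some o2 => PySem.List.slice data (some o1) (some o2)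
    | none => PySem.List.slice data (some o1) none

-- recursive restatement of A's empty-size-table branch
def pvSpecA (data : List Int) : List Int → List (List Int)
  | [] => []
  | o :: rest => pvChunk data o (pvFirstNZ rest) :: pvSpecA data rest

lemma slice_stop_zero (xs : List Int) (a : Int) :
    PySem.List.slice xs (some a) (some 0) = [] := by
  apply List.eq_nil_of_length_eq_zero
  rw [PySem.List.length_slice]
  have h0 : PySem.List.clampIdx xs.length (0 : Int) = 0 := by simp
  omega

lemma firstNZ_filter (xs : List Int) :
    pvFirstNZ xs = (xs.filter (fun o => o ≠ 0)).head? := by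
  induction xs with
  | nil => rfl
  | cons o rest ih =>
    by_cases h : o = 0
    · simp [pvFirstNZ, h, ih]
    · simp [pvFirstNZ, h]

lemma enum_map_specA (data : List Int) :
    ∀ (rest : List Int) (s : Nat) (full : List Int), full.drop s = rest →
      (PySem.List.enumerate rest (s : Int)).map
          (fun p => pvChunk data p.2 (pvFirstNZ (full.drop (p.1.toNat + 1)))) =
        pvSpecA data rest := by
  intro rest
  induction rest with
  | nil => intro s full h; simp [PySem.List.enumerate_nil, pvSpecA]
  | cons o rest ih =>
    intro s full h
    have hdrop : full.drop (s + 1) = rest := by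
      have h2 := @List.drop_drop Int 1 s full
      rw [h] at h2
      simpa using h2.symm
    rw [PySem.List.enumerate_cons]
    simp only [List.map_cons, pvSpecA]
    congr 1
    · simp [hdrop]
    · have e : (s : Int) + 1 = ((s + 1 : Nat) : Int) := by push_cast; ring
      rw [e]
      exact ih (s + 1) full hdrop

lemma specA_interleave (data : List Int) (O : List Int) :
    pvSpecA data O = pvInterleave O (pvPieces data (O.filter (fun o => o ≠ 0))) := by
  induction O with
  | nil => rfl
  | cons o rest ih =>
    by_cases h : o = 0
    · simp [pvSpecA, pvInterleave, pvChunk, h, ih]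
    · have hf : (o :: rest).filter (fun o => o ≠ 0) = o :: rest.filter (fun o => o ≠ 0) := by
        simp [h]
      rw [pvSpecA, hf, pvInterleave, if_neg h, ih, firstNZ_filter]
      cases rest.filter (fun o => o ≠ 0) with
      | nil => simp [pvChunk, if_neg h, pvPieces]
      | cons b t => simp [pvChunk, if_neg h, pvPieces]

lemma gen_chunks_eq (data O S : List Int) :
    gen_chunks_py data O S = gen_chunks_py_alt data O S := by
  unfold gen_chunks_py gen_chunks_py_alt
  by_cases hS : S = []
  · simp only [hS, ne_eq, not_true_eq_false, if_false]
    have h1 : (PySem.List.enumerate O 0).map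
        (fun (p : Int × Int) =>
          if p.2 = 0 then []
          else
            match pvFirstNZ (PySem.List.slice O (some (p.1 + 1)) none) with
            | some o2 => PySem.List.slice data (some p.2) (some o2)
            | none => PySem.List.slice data (some p.2) none) =
        (PySem.List.enumerate O 0).map
          (fun p => pvChunk data p.2 (pvFirstNZ (O.drop (p.1.toNat + 1)))) := by
      apply List.map_congr_left
      intro p hp
      obtain ⟨k, hk, rfl⟩ := (PySem.List.mem_enumerate_iff O 0 p).1 hp
      have e1 : (0 : Int) + (k : Int) + 1 = ((k + 1 : Nat) : Int) := by push_cast; ring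
      have e2 : ((0 : Int) + (k : Int)).toNat + 1 = k + 1 := by simp
      simp only [e1, e2, PySem.List.slice_from_natCast, pvChunk]
    have h3 := enum_map_specA data O 0 O (by simp)
    simp only [Nat.cast_zero] at h3
    rw [h1, h3, specA_interleave]
  · simp only [hS, ne_eq, not_false_eq_true, if_true]
    induction O.zip S with
    | nil => rfl
    | cons p rest ih =>
      rw [List.map_cons, pvSized, ih]
      congr 1
      by_cases h2 : p.2 = 0
      · simp [h2, slice_stop_zero]
      · simp [h2]

-- ===== VERDICT (by name: the statement is the Claim_ definition above) =====
theorem gen_chunks_py_spec : Claim_equal_gen_chunks_py := by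
  intro data O S _
  unfold Spec_gen_chunks_py
  exact gen_chunks_eq data O S
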